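-- pv_equiv track=rewrite | github.com/taozhijiang/chinese_nlp | DL_python/dl_segment_v2.py | sent2tag
-- ===== SOURCE A (Python) =====
-- tagindex = {'B':0, 'E':1, 'M':2, 'S':3 }
--
-- def sent2tag(sentence):
--     train_tg = []
--     for item in sentence:
--         if len(item) == 1:
--             train_tg.append(tagindex['S'])
--             continue
--         train_tg.append(tagindex['B'])
--         for w in item[1:len(item)-1]:
--             train_tg.append(tagindex['M'])
--         train_tg.append(tagindex['E'])
--     return train_tg
-- ===== SOURCE B (Python) =====
-- tagindex = {'B':0, 'E':1, 'M':2, 'S':3}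
--
-- def sent2tag(sentence):
--     labels = ''.join('S' if len(item) == 1 else 'B' + 'M' * (len(item) - 2) + 'E'
--                      for item in sentence)
--     return [tagindex[c] for c in labels]
-- ===== Notes on version B (the rewrite author's own statement) =====
-- stated objective: simpler
-- what changed: Replaces the per-word positional append loop (branch + inner character loop) by a two-phase decomposition: build one BMES label string per word with a closed-form formula 'B'+'M'*(len-2)+'E', join, then translate each label character to its index in a single comprehension.
import Mathlib
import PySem

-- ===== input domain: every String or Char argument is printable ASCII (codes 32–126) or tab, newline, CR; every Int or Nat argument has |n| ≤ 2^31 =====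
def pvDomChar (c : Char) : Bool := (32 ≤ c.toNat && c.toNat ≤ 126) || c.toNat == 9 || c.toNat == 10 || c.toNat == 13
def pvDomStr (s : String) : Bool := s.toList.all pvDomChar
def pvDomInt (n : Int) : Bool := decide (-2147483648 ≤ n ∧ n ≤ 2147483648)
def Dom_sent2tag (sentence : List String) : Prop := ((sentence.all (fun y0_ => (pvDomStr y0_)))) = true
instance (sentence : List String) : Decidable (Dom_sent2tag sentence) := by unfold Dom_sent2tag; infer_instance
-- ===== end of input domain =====

-- B differs from A only in decomposition: one joined BMES label string, then a translate pass.

-- ===== PORT A =====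
-- tagindex = {'B':0, 'E':1, 'M':2, 'S':3}
def tagindex : PySem.Dict String Int :=
  PySem.Dict.ofList [("B", 0), ("E", 1), ("M", 2), ("S", 3)]

-- literal port of A: accumulator list, branch on len==1, inner loop over item[1:len(item)-1]
def sent2tag (sentence : List String) : List Int :=
  sentence.foldl
    (fun train_tg item =>
      if PySem.Str.len item = 1 then
        train_tg ++ [tagindex.getD "S" 0]
      else
        ((PySem.List.slice item.toList (some 1) (some ((PySem.Str.len item : Int) - 1))).foldl
            (fun acc _w => acc ++ [tagindex.getD "M" 0])
            (train_tg ++ [tagindex.getD "B" 0]))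
          ++ [tagindex.getD "E" 0])
    []

-- ===== PORT B =====
-- per-word BMES label: 'S' if len==1 else 'B' + 'M'*(len-2) + 'E'
def wordLabel (item : String) : List Char :=
  if PySem.Str.len item = 1 then ['S']
  else 'B' :: (List.replicate (PySem.Str.len item - 2).toNat 'M' ++ ['E'])

def tagindexB : PySem.Dict Char Int :=
  PySem.Dict.ofList [('B', 0), ('E', 1), ('M', 2), ('S', 3)]

-- join the labels, then translate each character to its index
def sent2tag_alt (sentence : List String) : List Int :=
  ((sentence.map wordLabel).flatten).map (fun c => tagindexB.getD c 0)

-- ===== PRECONDITION & SPEC =====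
def Spec_sent2tag (sentence : List String) (out : List Int) : Prop := out = sent2tag_alt sentence
instance (sentence : List String) (out : List Int) : Decidable (Spec_sent2tag sentence out) := by unfold Spec_sent2tag; infer_instance

-- ===== CLAIM (what is proved, stated in full; the proofs are below) =====
def Claim_equal_sent2tag : Prop := ∀ (sentence : List String), Dom_sent2tag sentence → Spec_sent2tag sentence (sent2tag sentence)

-- ===== LEMMAS AND PROOFS =====

-- the inner slice item[1:len-1] has length len-2 (Nat subtraction)
lemma slice_mid_length (xs : List Char) :
    (PySem.List.slice xs (some 1) (some ((xs.length : Int) - 1))).length = xs.length - 2 := by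
  rcases xs with _ | ⟨x, ys⟩
  · simp [PySem.List.slice]
  · have hb : (0:Int) ≤ ((x :: ys).length : Int) - 1 := by
      simp
    rw [PySem.List.slice_toNat _ (by omega) hb]
    simp

-- A's per-word contribution equals B's translated word label
lemma word_step (acc : List Int) (item : String) :
    (if PySem.Str.len item = 1 then
        acc ++ [tagindex.getD "S" 0]
      else
        ((PySem.List.slice item.toList (some 1) (some ((PySem.Str.len item : Int) - 1))).foldl
            (fun a _w => a ++ [tagindex.getD "M" 0]) (acc ++ [tagindex.getD "B" 0]))
          ++ [tagindex.getD "E" 0])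
      = acc ++ (wordLabel item).map (fun c => tagindexB.getD c 0) := by
  unfold wordLabel
  split_ifs with h
  · rfl
  · rw [PySem.List.foldl_append_singleton_eq_map]
    rw [List.map_const', PySem.Str.len_eq, slice_mid_length]
    have h2 : ((item.toList.length : Int) - 2).toNat = item.toList.length - 2 := by omega
    rw [h2]
    simp only [List.map_cons, List.map_replicate, List.map_append, List.map_nil,
      List.append_assoc]
    rfl

lemma sent2tag_acc (sentence : List String) (acc : List Int) :
    sentence.foldl
      (fun train_tg item =>
        if PySem.Str.len item = 1 then
          train_tg ++ [tagindex.getD "S" 0]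
        else
          ((PySem.List.slice item.toList (some 1) (some ((PySem.Str.len item : Int) - 1))).foldl
              (fun a _w => a ++ [tagindex.getD "M" 0]) (train_tg ++ [tagindex.getD "B" 0]))
            ++ [tagindex.getD "E" 0])
      acc
    = acc ++ ((sentence.map wordLabel).flatten).map (fun c => tagindexB.getD c 0) := by
  induction sentence generalizing acc with
  | nil => simp
  | cons x xs ih => rw [List.foldl_cons, ih, word_step]; simp

-- ===== VERDICT (by name: the statement is the Claim_ definition above) =====
theorem sent2tag_spec : Claim_equal_sent2tag := by
  intro sentence _
  unfold Spec_sent2tag sent2tag sent2tag_alt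
  exact sent2tag_acc sentence []
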